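-- pv_equiv track=rewrite | github.com/timurka43/cipher_cracker | hw4.py | insert_chars
-- ===== SOURCE A (Python) =====
-- def insert_chars(message):
--      # convert the string to a list of chars
--      my_list = list(message)
--      # for each character in the message
--      index = 0
--      length = len(my_list)
--      while (index < length):
--           my_list.insert(index, 'T')
--           my_list.insert(index, 'q')
--           index += 7
--           length += 2
--
--      # join the list of characters back into a string to return
--      message = ''.join(str(x) for x in my_list)
--      return message
-- ===== SOURCE B (Python) =====
-- def insert_chars(message):
--     # Single linear pass: "qT" is inserted before every 5-character chunk
--     # of the original message, which is exactly where A's growing-index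
--     # insertions land.
--     return ''.join('qT' + message[i:i+5] for i in range(0, len(message), 5))
-- ===== Notes on version B (the rewrite author's own statement) =====
-- stated objective: faster
-- what changed: Replaced the quadratic while-loop that repeatedly shifts the list with list.insert by a single pass joining 'qT' + each 5-character slice over range(0, len, 5).
import Mathlib
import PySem

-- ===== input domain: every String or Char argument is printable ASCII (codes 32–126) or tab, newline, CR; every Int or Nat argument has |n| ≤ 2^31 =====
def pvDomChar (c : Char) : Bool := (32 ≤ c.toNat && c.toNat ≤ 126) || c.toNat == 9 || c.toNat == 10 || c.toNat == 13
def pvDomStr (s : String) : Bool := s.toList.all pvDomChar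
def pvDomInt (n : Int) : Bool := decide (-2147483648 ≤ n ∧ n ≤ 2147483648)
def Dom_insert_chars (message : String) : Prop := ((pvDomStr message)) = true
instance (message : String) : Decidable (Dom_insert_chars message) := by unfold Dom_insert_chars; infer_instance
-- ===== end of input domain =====

-- B replaces A's quadratic while-loop of list.insert calls with a single
-- linear pass joining 'qT' + each 5-character slice (objective: faster).

-- ===== PORT A =====
-- the while-loop of A: state is (my_list, index, length); length tracks len(my_list)
def insertLoop (l : List Char) (index length : Int) : List Char :=
  if index < length then
    insertLoop (PySem.List.insert (PySem.List.insert l index 'T') index 'q')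
      (index + 7) (length + 2)
  else l
termination_by (length - index).toNat
decreasing_by omega

def insert_chars (message : String) : String :=
  let my_list := message.toList
  -- ''.join(str(x) for x in my_list): str(x) is the identity on the single chars
  String.ofList (insertLoop my_list 0 (my_list.length : Int))

-- ===== PORT B =====
def insert_chars_alt (message : String) : String :=
  let cs := message.toList
  -- ''.join('qT' + message[i:i+5] for i in range(0, len(message), 5))
  String.ofList ((PySem.List.pyRange 0 (cs.length : Int) 5).foldl
    (fun acc i => acc ++ ('q' :: 'T' :: PySem.List.slice cs (some i) (some (i + 5)))) [])

-- ===== PRECONDITION & SPEC =====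
def Spec_insert_chars (message : String) (out : String) : Prop := out = insert_chars_alt message
instance (message : String) (out : String) : Decidable (Spec_insert_chars message out) := by unfold Spec_insert_chars; infer_instance

-- ===== CLAIM (what is proved, stated in full; the proofs are below) =====
def Claim_equal_insert_chars : Prop := ∀ (message : String), Dom_insert_chars message → Spec_insert_chars message (insert_chars message)

-- ===== LEMMAS AND PROOFS =====

-- common normal form: "qT" before every 5-char chunk
def chunkGo (l : List Char) : List Char :=
  if l = [] then [] else 'q' :: 'T' :: (l.take 5 ++ chunkGo (l.drop 5))
termination_by l.length
decreasing_by
  rename_i h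
  have : l.length ≠ 0 := by simpa using h
  simp
  omega

lemma chunkGo_nil : chunkGo [] = [] := by rw [chunkGo]; simp

lemma chunkGo_cons (l : List Char) (h : l ≠ []) :
    chunkGo l = 'q' :: 'T' :: (l.take 5 ++ chunkGo (l.drop 5)) := by
  rw [chunkGo]; simp [h]

-- step-5 range induction forms
lemma pyRange5_nil (a b : Int) (h : b ≤ a) : PySem.List.pyRange a b 5 = [] := by
  rw [PySem.List.pyRange_of_pos a b (by norm_num)]
  simp [show ¬ a < b by omega]

lemma pyRange5_cons (a b : Int) (h : a < b) :
    PySem.List.pyRange a b 5 = a :: PySem.List.pyRange (a + 5) b 5 := by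
  rw [PySem.List.pyRange_of_pos a b (by norm_num),
      PySem.List.pyRange_of_pos (a + 5) b (by norm_num)]
  by_cases h5 : a + 5 < b
  · have hc : ((b - a + 5 - 1) / 5).toNat = ((b - (a + 5) + 5 - 1) / 5).toNat + 1 := by
      omega
    rw [if_pos h, if_pos h5, hc, List.range_succ_eq_map]
    simp [List.map_map, Function.comp]
    intro k _
    ring
  · have hc : ((b - a + 5 - 1) / 5).toNat = 1 := by omega
    rw [if_pos h, if_neg h5, hc]
    simp

-- invariant for A's loop: the list left of `idx` is fully processed
lemma A_inv (fuel : Nat) : ∀ (l : List Char) (idx : Nat), l.length ≤ idx + fuel →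
    insertLoop l (idx : Int) (l.length : Int) = l.take idx ++ chunkGo (l.drop idx) := by
  induction fuel using Nat.strong_induction_on with
  | _ fuel ih =>
    intro l idx hle
    rw [insertLoop]
    by_cases h : idx < l.length
    · rw [if_pos (by exact_mod_cast h)]
      have hidx : idx ≤ l.length := le_of_lt h
      rw [PySem.List.insert_natCast l idx 'T' hidx]
      have htk : (List.take idx l).length = idx := by simp; omega
      have hins2 : PySem.List.insert (List.take idx l ++ 'T' :: List.drop idx l) (idx : Int) 'q'
          = List.take idx l ++ 'q' :: 'T' :: List.drop idx l := by
        rw [PySem.List.insert_natCast _ idx 'q' (by simp; omega)]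
        rw [List.take_left' htk, List.drop_left' htk]
      rw [hins2]
      set l' : List Char := List.take idx l ++ 'q' :: 'T' :: List.drop idx l with hl'
      have hlen' : l'.length = l.length + 2 := by simp [hl']; omega
      have hcast : ((l.length : Int) + 2) = (l'.length : Int) := by rw [hlen']; push_cast; ring
      have hcast2 : ((idx : Int) + 7) = ((idx + 7 : Nat) : Int) := by push_cast; ring
      have hfuel : 0 < fuel := by omega
      rw [hcast, hcast2, ih (fuel - 5) (by omega) l' (idx + 7) (by omega)]
      -- compute take/drop of l' at idx+7
      have htake : l'.take (idx + 7) = List.take idx l ++ 'q' :: 'T' :: (List.drop idx l).take 5 := by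
        rw [hl', List.take_append, htk]
        have : idx + 7 - idx = 7 := by omega
        rw [this, List.take_of_length_le (by rw [htk]; omega)]
        simp
      have hdrop : l'.drop (idx + 7) = (List.drop idx l).drop 5 := by
        rw [hl', List.drop_append, htk]
        have : idx + 7 - idx = 7 := by omega
        rw [this, List.drop_of_length_le (by rw [htk]; omega)]
        simp
      rw [htake, hdrop, chunkGo_cons (List.drop idx l) (by simp; omega)]
      simp
    · rw [if_neg (by exact_mod_cast h)]
      rw [List.drop_of_length_le (by omega), chunkGo_nil,
          List.take_of_length_le (by omega), List.append_nil]

-- invariant for B's fold over range(0, n, 5)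
lemma B_inv (cs : List Char) (fuel : Nat) : ∀ (j : Nat) (acc : List Char),
    cs.length ≤ j + fuel →
    (PySem.List.pyRange (j : Int) (cs.length : Int) 5).foldl
      (fun acc i => acc ++ ('q' :: 'T' :: PySem.List.slice cs (some i) (some (i + 5)))) acc
    = acc ++ chunkGo (cs.drop j) := by
  induction fuel using Nat.strong_induction_on with
  | _ fuel ih =>
    intro j acc hle
    by_cases h : j < cs.length
    · rw [pyRange5_cons _ _ (by exact_mod_cast h)]
      have hs : PySem.List.slice cs (some (j : Int)) (some ((j : Int) + 5))
          = (cs.drop j).take 5 := by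
        exact_mod_cast PySem.List.slice_natCast_add cs j 5
      have hcast : ((j : Int) + 5) = ((j + 5 : Nat) : Int) := by push_cast; ring
      rw [List.foldl_cons, hs, hcast]
      rw [ih (fuel - 1) (by omega) (j + 5) _ (by omega)]
      rw [chunkGo_cons (cs.drop j) (by simp; omega)]
      simp
    · rw [pyRange5_nil _ _ (by exact_mod_cast Nat.le_of_not_lt h)]
      rw [List.drop_of_length_le (by omega), chunkGo_nil, List.append_nil,
          List.foldl_nil]

-- ===== VERDICT (by name: the statement is the Claim_ definition above) =====
theorem insert_chars_spec : Claim_equal_insert_chars := by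
  intro message _
  unfold Spec_insert_chars insert_chars insert_chars_alt
  show String.ofList (insertLoop message.toList 0 (message.toList.length : Int))
      = String.ofList ((PySem.List.pyRange 0 (message.toList.length : Int) 5).foldl
        (fun acc i => acc ++ ('q' :: 'T' :: PySem.List.slice message.toList (some i) (some (i + 5)))) [])
  have hA := A_inv message.toList.length message.toList 0 (by omega)
  have hB := B_inv message.toList message.toList.length 0 [] (by omega)
  simp only [Nat.cast_zero] at hA hB
  rw [hA, hB]
  simp
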